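-- pv_equiv track=rewrite | github.com/mireklzicar/gutenberg_download | download_gutenberg_topN.py | pick_best_epub
-- ===== SOURCE A (Python) =====
-- from typing import Dict, List, Optional
--
-- def pick_best_epub(formats: Dict[str, str]) -> Optional[str]:
--     """Return the best EPUB URL following the preference: noimages → plain → images."""
--     candidates = [url for mime, url in formats.items() if mime.startswith("application/epub")]
--     if not candidates:
--         return None
--
--     def score(u: str) -> int:
--         if ".noimages" in u:
--             return 0
--         if ".images" in u:
--             return 2
--         return 1  # plain EPUB (usually .epub3 or .epub)
--
--     candidates.sort(key=score)
--     return candidates[0]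
-- ===== SOURCE B (Python) =====
-- def pick_best_epub(formats):
--     """Return the best EPUB URL following the preference: noimages -> plain -> images."""
--     epubs = [url for mime, url in formats.items() if mime.startswith("application/epub")]
--     for url in epubs:
--         if ".noimages" in url:
--             return url
--     for url in epubs:
--         if ".noimages" not in url and ".images" not in url:
--             return url
--     for url in epubs:
--         if ".images" in url:
--             return url
--     return None
-- ===== Notes on version B (the rewrite author's own statement) =====
-- stated objective: simpler
-- what changed: Replaced the score function plus stable sort with three preference-ordered linear scans that return the first matching URL (noimages, then plain, then images), relying on the stable sort's tie-break being first-in-iteration-order.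
import Mathlib
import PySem

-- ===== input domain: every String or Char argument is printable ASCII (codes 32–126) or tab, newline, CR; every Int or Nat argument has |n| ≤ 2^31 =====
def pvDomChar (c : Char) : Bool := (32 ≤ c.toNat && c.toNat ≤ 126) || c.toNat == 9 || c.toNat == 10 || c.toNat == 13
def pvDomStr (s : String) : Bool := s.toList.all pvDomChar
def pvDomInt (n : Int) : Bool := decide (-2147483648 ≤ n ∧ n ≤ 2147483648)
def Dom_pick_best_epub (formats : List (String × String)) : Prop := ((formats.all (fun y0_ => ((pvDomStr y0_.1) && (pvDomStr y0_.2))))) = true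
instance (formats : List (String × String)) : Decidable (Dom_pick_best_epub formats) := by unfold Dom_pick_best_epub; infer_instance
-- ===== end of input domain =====

-- B replaces A's score-and-stable-sort with three preference-ordered linear scans; return values proved equal.


-- ===== PORT A =====
-- helper: the inner `score` function of A
def pv_score (u : String) : Int :=
  if PySem.Str.isIn ".noimages" u then 0
  else if PySem.Str.isIn ".images" u then 2
  else 1

def pick_best_epub (formats : List (String × String)) : Option String :=
  let candidates :=
    (PySem.Dict.ofList formats).items.foldl
      (fun acc mu => if PySem.Str.startswith mu.1 "application/epub" then acc ++ [mu.2] else acc) []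
  if candidates = [] then none
  else PySem.List.pyGet? (PySem.List.sorted candidates pv_score false) 0

-- ===== PORT B =====
def pick_best_epub_alt (formats : List (String × String)) : Option String :=
  let epubs :=
    (PySem.Dict.ofList formats).items.filterMap
      (fun mu => if PySem.Str.startswith mu.1 "application/epub" then some mu.2 else none)
  match epubs.find? (fun u => PySem.Str.isIn ".noimages" u) with
  | some u => some u
  | none =>
    match epubs.find? (fun u => !(PySem.Str.isIn ".noimages" u) && !(PySem.Str.isIn ".images" u)) with
    | some u => some u
    | none => epubs.find? (fun u => PySem.Str.isIn ".images" u)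

-- ===== PRECONDITION & SPEC =====
def Spec_pick_best_epub (formats : List (String × String)) (out : Option String) : Prop := out = pick_best_epub_alt formats
instance (formats : List (String × String)) (out : Option String) : Decidable (Spec_pick_best_epub formats out) := by unfold Spec_pick_best_epub; infer_instance

-- ===== CLAIM (what is proved, stated in full; the proofs are below) =====
def Claim_equal_pick_best_epub : Prop := ∀ (formats : List (String × String)), Dom_pick_best_epub formats → Spec_pick_best_epub formats (pick_best_epub formats)

-- ===== LEMMAS AND PROOFS =====

-- B's three-level cascade on an arbitrary candidate list
def pv_casc (c : List String) : Option String :=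
  match c.find? (fun u => PySem.Str.isIn ".noimages" u) with
  | some u => some u
  | none =>
    match c.find? (fun u => !(PySem.Str.isIn ".noimages" u) && !(PySem.Str.isIn ".images" u)) with
    | some u => some u
    | none => c.find? (fun u => PySem.Str.isIn ".images" u)

theorem pv_head_insertBy (bf : String → String → Bool) (x m : String) (t : List String) :
    (PySem.List.insertBy bf x (m :: t)).head? = some (if bf x m then x else m) := by
  by_cases h : bf x m = true <;> simp [PySem.List.insertBy, h]

theorem pv_sorted_append (xs : List String) (x : String) :
    PySem.List.sorted (xs ++ [x]) pv_score false
      = PySem.List.insertBy (fun a b => decide (pv_score a < pv_score b)) x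
          (PySem.List.sorted xs pv_score false) := by
  rw [PySem.List.sorted_eq_foldl_insertBy, PySem.List.sorted_eq_foldl_insertBy, List.foldl_append]
  simp

theorem pv_find_singleton (p : String → Bool) (x : String) :
    List.find? p [x] = if p x = true then some x else none := by
  cases h : p x <;> simp [List.find?, h]

-- head of A's stable sort by score = B's cascade
theorem pv_sorted_head_eq_casc (c : List String) :
    (PySem.List.sorted c pv_score false).head? = pv_casc c := by
  induction c using List.reverseRecOn with
  | nil => simp [PySem.List.sorted, pv_casc]
  | append_singleton xs x ih =>
    rw [pv_sorted_append]
    unfold pv_casc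
    simp only [List.find?_append]
    cases hq0 : xs.find? (fun u => PySem.Str.isIn ".noimages" u) with
    | some m =>
      have hcasc : pv_casc xs = some m := by unfold pv_casc; rw [hq0]
      rw [hcasc] at ih
      cases hS : PySem.List.sorted xs pv_score false with
      | nil => rw [hS] at ih; simp at ih
      | cons mh t =>
        rw [hS] at ih
        simp only [List.head?_cons, Option.some.injEq] at ih
        subst ih
        have hm0 : PySem.Str.isIn ".noimages" mh = true := by
          simpa using List.find?_some hq0
        have hlt : ¬ (pv_score x < pv_score mh) := by
          unfold pv_score; rw [hm0]; simp only [if_true]; split_ifs <;> omega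
        rw [pv_head_insertBy]
        simp only [Option.some_or, decide_eq_true_eq, hlt, if_false]
    | none =>
      have hxs0 : ∀ y ∈ xs, PySem.Str.isIn ".noimages" y = false := by
        intro y hy
        simpa using List.find?_eq_none.mp hq0 y hy
      cases hq1 : xs.find? (fun u => !(PySem.Str.isIn ".noimages" u) && !(PySem.Str.isIn ".images" u)) with
      | some m =>
        have hcasc : pv_casc xs = some m := by unfold pv_casc; rw [hq0, hq1]
        rw [hcasc] at ih
        cases hS : PySem.List.sorted xs pv_score false with
        | nil => rw [hS] at ih; simp at ih
        | cons mh t =>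
          rw [hS] at ih
          simp only [List.head?_cons, Option.some.injEq] at ih
          subst ih
          have h1 := List.find?_some hq1
          simp only [Bool.and_eq_true, Bool.not_eq_true'] at h1
          have hm1 : pv_score mh = 1 := by
            unfold pv_score; rw [h1.1, h1.2]; simp
          rw [pv_head_insertBy]
          by_cases hx0 : PySem.Str.isIn ".noimages" x = true
          · have hlt : pv_score x < pv_score mh := by
              rw [hm1]; unfold pv_score; rw [hx0]; simp
            simp only [pv_find_singleton, hx0, if_true, Option.none_or, decide_eq_true_eq, hlt]
          · have hge : pv_score x ≥ 1 := by unfold pv_score; split_ifs <;> omega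
            have hlt : ¬ (pv_score x < pv_score mh) := by omega
            simp only [pv_find_singleton, eq_false_of_ne_true hx0, Bool.false_eq_true, if_false,
              Option.none_or, Option.some_or, decide_eq_true_eq, hlt]
      | none =>
        cases hq2 : xs.find? (fun u => PySem.Str.isIn ".images" u) with
        | some m =>
          have hcasc : pv_casc xs = some m := by unfold pv_casc; rw [hq0, hq1, hq2]
          rw [hcasc] at ih
          cases hS : PySem.List.sorted xs pv_score false with
          | nil => rw [hS] at ih; simp at ih
          | cons mh t =>
            rw [hS] at ih
            simp only [List.head?_cons, Option.some.injEq] at ih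
            subst ih
            have hmem : mh ∈ xs := List.mem_of_find?_eq_some hq2
            have h0 : PySem.Str.isIn ".noimages" mh = false := hxs0 mh hmem
            have h2 : PySem.Str.isIn ".images" mh = true := by
              simpa using List.find?_some hq2
            have hm2 : pv_score mh = 2 := by
              unfold pv_score; rw [h0, h2]; simp
            rw [pv_head_insertBy]
            by_cases hx0 : PySem.Str.isIn ".noimages" x = true
            · have hlt : pv_score x < pv_score mh := by
                rw [hm2]; unfold pv_score; rw [hx0]; simp
              simp only [pv_find_singleton, hx0, if_true, Option.none_or, decide_eq_true_eq, hlt]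
            · by_cases hx2 : PySem.Str.isIn ".images" x = true
              · have hlt : ¬ (pv_score x < pv_score mh) := by
                  rw [hm2]; unfold pv_score
                  rw [eq_false_of_ne_true hx0, hx2]; simp
                simp only [pv_find_singleton, eq_false_of_ne_true hx0, hx2, Bool.not_false,
                  Bool.true_and, Bool.not_true, Bool.false_eq_true, if_false, Option.none_or,
                  Option.some_or, decide_eq_true_eq, hlt]
              · have hlt : pv_score x < pv_score mh := by
                  rw [hm2]; unfold pv_score
                  rw [eq_false_of_ne_true hx0, eq_false_of_ne_true hx2]; simp
                simp only [pv_find_singleton, eq_false_of_ne_true hx0, eq_false_of_ne_true hx2,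
                  Bool.not_false, Bool.and_self, if_true, Bool.false_eq_true, if_false,
                  Option.none_or, decide_eq_true_eq, hlt]
        | none =>
          have hcasc : pv_casc xs = none := by unfold pv_casc; rw [hq0, hq1, hq2]
          rw [hcasc] at ih
          cases hS : PySem.List.sorted xs pv_score false with
          | cons mh t => rw [hS] at ih; simp at ih
          | nil =>
            simp only [PySem.List.insertBy, List.head?_cons]
            by_cases hx0 : PySem.Str.isIn ".noimages" x = true
            · simp only [pv_find_singleton, hx0, if_true, Option.none_or]
            · by_cases hx2 : PySem.Str.isIn ".images" x = true
              · simp only [pv_find_singleton, eq_false_of_ne_true hx0, hx2, Bool.not_false,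
                  Bool.true_and, Bool.not_true, Bool.false_eq_true, if_false, Option.none_or,
                  if_true]
              · simp only [pv_find_singleton, eq_false_of_ne_true hx0, eq_false_of_ne_true hx2,
                  Bool.not_false, Bool.and_self, if_true, Bool.false_eq_true, if_false,
                  Option.none_or]

theorem pv_pyGet?_zero_head (l : List String) : PySem.List.pyGet? l 0 = l.head? := by
  cases l <;> simp [PySem.List.pyGet?, PySem.List.pyIdx?]

theorem pv_filter_eq (items : List (String × String)) :
    items.foldl (fun acc mu => if PySem.Str.startswith mu.1 "application/epub" then acc ++ [mu.2] else acc) []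
      = items.filterMap (fun mu => if PySem.Str.startswith mu.1 "application/epub" then some mu.2 else none) := by
  rw [PySem.List.foldl_append_if]
  induction items with
  | nil => simp
  | cons a l ih =>
    by_cases h : PySem.Str.startswith a.1 "application/epub" = true <;>
      simp_all

-- ===== VERDICT (by name: the statement is the Claim_ definition above) =====
theorem pick_best_epub_spec : Claim_equal_pick_best_epub := by
  intro formats _
  unfold Spec_pick_best_epub
  simp only [pick_best_epub, pick_best_epub_alt]
  rw [pv_filter_eq]
  set c := (PySem.Dict.ofList formats).items.filterMap
      (fun mu => if PySem.Str.startswith mu.1 "application/epub" then some mu.2 else none) with hc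
  have h := pv_sorted_head_eq_casc c
  by_cases hnil : c = []
  · simp [hnil]
  · rw [if_neg hnil, pv_pyGet?_zero_head, h]
    unfold pv_casc
    rfl
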